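-- pv_equiv track=rewrite | github.com/Pritz69/LeetCode-Solutions | 1333-sort-the-jumbled-numbers/1333-sort-the-jumbled-numbers.py | sortJumbled
-- ===== SOURCE A (Python) =====
-- from typing import List
--
-- def sortJumbled(mapping: List[int], nums: List[int]) -> List[int]:
--     ans=[]
--     for x in nums :
--         nn=""
--         t=x
--         if t==0 :
--             ans.append((x,mapping[0]))
--             continue
--         while t :
--             d=t%10
--             nn = str(mapping[d]) + nn
--             t=t//10
--         if nn :
--             ans.append((x,int(nn)))
--     ans=sorted(ans, key=lambda x:x[1])
--     return [x[0] for x in ans]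
-- ===== SOURCE B (Python) =====
-- def sortJumbled(mapping, nums):
--     # Hand-written stable merge sort on (mapped_key, original_index, value) triples:
--     # ties are broken explicitly by the original index instead of relying on sort stability.
--     def key(x):
--         if x == 0:
--             return mapping[0]
--         return int(''.join(str(mapping[int(c)]) for c in str(x)))
--
--     def merge(u, v):
--         out = []
--         i = j = 0
--         while i < len(u) and j < len(v):
--             if (u[i][0], u[i][1]) <= (v[j][0], v[j][1]):
--                 out.append(u[i]); i += 1
--             else:
--                 out.append(v[j]); j += 1
--         return out + u[i:] + v[j:]
--
--     def msort(p):
--         if len(p) <= 1: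
--             return p
--         m = len(p) // 2
--         return merge(msort(p[:m]), msort(p[m:]))
--
--     triples = [(key(x), i, x) for i, x in enumerate(nums)]
--     return [t[2] for t in msort(triples)]
-- ===== Notes on version B (the rewrite author's own statement) =====
-- stated objective: alternative
-- what changed: B replaces A's decorate-with-(x,key)-tuples + library stable sort by a hand-written top-down merge sort over (key, original_index, value) triples whose merge breaks ties explicitly by the original index (no reliance on sort stability), with the key computed by mapping the digit characters of str(x) instead of A's %10//10 arithmetic loop.
import Mathlib
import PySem

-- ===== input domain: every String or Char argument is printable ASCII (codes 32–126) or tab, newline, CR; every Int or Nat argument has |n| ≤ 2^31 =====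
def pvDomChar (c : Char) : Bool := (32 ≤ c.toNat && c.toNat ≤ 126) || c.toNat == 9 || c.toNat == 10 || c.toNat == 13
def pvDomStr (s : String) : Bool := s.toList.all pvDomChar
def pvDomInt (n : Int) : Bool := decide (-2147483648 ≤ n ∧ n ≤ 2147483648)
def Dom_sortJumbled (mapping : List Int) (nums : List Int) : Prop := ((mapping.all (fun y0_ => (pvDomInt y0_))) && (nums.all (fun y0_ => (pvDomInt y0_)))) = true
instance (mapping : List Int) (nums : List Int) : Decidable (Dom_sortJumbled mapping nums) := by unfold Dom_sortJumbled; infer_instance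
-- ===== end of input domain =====

-- B replaces A's decorate-with-(x,key) + library stable sort by a hand-written merge sort on
-- (key, original index, value) triples with explicit index tie-breaking (alternative; same cost).


-- ===== PORT A =====
-- A's `while t:` loop; the loop runs on t ≥ 0 only (for negative t Python's loop never
-- terminates, and Pre_ excludes negative nums), so it is ported as structural descent on Nat.
-- d = t % 10; nn = str(mapping[d]) + nn; t = t // 10   (Nat % and / agree with Python on t ≥ 0)
def aLoop (mapping : List Int) (t : Nat) (nn : List Char) : List Char :=
  if t = 0 then nn
  else aLoop mapping (t / 10)
        (PySem.Int.toChars (PySem.List.pyGetD mapping ((t % 10 : Nat) : Int) 0) ++ nn)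
  termination_by t
  decreasing_by exact Nat.div_lt_self (Nat.pos_of_ne_zero (by assumption)) (by norm_num)

-- mapping[0] and int(nn) raise outside Pre_; the total pyGetD/getD forms are used there.
def sortJumbled (mapping : List Int) (nums : List Int) : List Int :=
  let ans : List (Int × Int) := nums.foldl (fun ans x =>
    if x = 0 then ans ++ [(x, PySem.List.pyGetD mapping 0 0)]
    else
      let nn := aLoop mapping x.toNat []
      if nn ≠ [] then ans ++ [(x, (PySem.Int.ofChars? nn).getD 0)] else ans) []
  (PySem.List.sorted ans (fun p => p.2) false).map (fun p => p.1)

-- ===== PORT B =====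
-- key(x): int(''.join(str(mapping[int(c)]) for c in str(x))), with the x == 0 shortcut;
-- ''.join on List (List Char) is flatten, int(s) is PySem.Int.ofChars? (total .getD form outside Pre_).
def bKey (mapping : List Int) (x : Int) : Int :=
  if x = 0 then PySem.List.pyGetD mapping 0 0
  else (PySem.Int.ofChars? (((PySem.Int.toChars x).map (fun c =>
          PySem.Int.toChars (PySem.List.pyGetD mapping ((PySem.Int.ofChars? [c]).getD 0) 0))).flatten)).getD 0

-- (u[i][0], u[i][1]) <= (v[j][0], v[j][1]): Python's tuple `<=` on int pairs is exactly this
-- lexicographic test.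
def bLe (a b : Int × Int × Int) : Bool :=
  decide (a.1 < b.1 ∨ (a.1 = b.1 ∧ a.2.1 ≤ b.2.1))

-- B's `while i < len(u) and j < len(v)` merge loop, with the trailing `out + u[i:] + v[j:]`
-- (both slice starts satisfy 0 ≤ i ≤ len, where u[i:] is exactly List.drop i).
def mergeLoop (u v : List (Int × Int × Int)) (i j : Nat) (out : List (Int × Int × Int)) :
    List (Int × Int × Int) :=
  if h : i < u.length ∧ j < v.length then
    if bLe u[i] v[j] then mergeLoop u v (i + 1) j (out ++ [u[i]])
    else mergeLoop u v i (j + 1) (out ++ [v[j]])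
  else out ++ u.drop i ++ v.drop j
  termination_by (u.length - i) + (v.length - j)
  decreasing_by all_goals omega

-- msort: p[:m] / p[m:] with m = len(p) // 2 are List.take m / List.drop m (0 ≤ m ≤ len).
def msort (p : List (Int × Int × Int)) : List (Int × Int × Int) :=
  if p.length ≤ 1 then p
  else mergeLoop (msort (p.take (p.length / 2))) (msort (p.drop (p.length / 2))) 0 0 []
  termination_by p.length
  decreasing_by
  · simp only [List.length_take]; omega
  · simp only [List.length_drop]; omega

def sortJumbled_alt (mapping : List Int) (nums : List Int) : List Int :=
  let triples := (PySem.List.enumerate nums).map (fun p => (bKey mapping p.2, p.1, p.2))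
  (msort triples).map (fun t => t.2.2)

-- ===== PRECONDITION & SPEC =====
-- Pre_ is exactly the set of inputs on which the Python A returns: it excludes negative nums
-- (A's while-loop never terminates there), nums whose digits index past the end of mapping
-- (IndexError, also for 0 with an empty mapping), and nums for which a NON-leading digit maps
-- to a negative value (then int(nn) gets a '-' in the middle and raises ValueError).
def Pre_sortJumbled (mapping : List Int) (nums : List Int) : Prop :=
  ∀ x ∈ nums, 0 ≤ x ∧
    (x = 0 → mapping ≠ []) ∧
    (0 < x → (∀ d ∈ Nat.digits 10 x.toNat, d < mapping.length) ∧
             (∀ d ∈ (Nat.digits 10 x.toNat).dropLast, 0 ≤ mapping.getD d 0))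
instance (mapping : List Int) (nums : List Int) : Decidable (Pre_sortJumbled mapping nums) := by
  unfold Pre_sortJumbled; infer_instance

def pvWitness_sortJumbled : List Int × List Int := ([8, 9, 4, 0, 2, 1, 3, 5, 7, 6], [991, 338, 38])

def Spec_sortJumbled (mapping : List Int) (nums : List Int) (out : List Int) : Prop := out = sortJumbled_alt mapping nums
instance (mapping : List Int) (nums : List Int) (out : List Int) : Decidable (Spec_sortJumbled mapping nums out) := by unfold Spec_sortJumbled; infer_instance

-- ===== CLAIM (what is proved, stated in full; the proofs are below) =====
def Claim_equal_sortJumbled : Prop := ∀ (mapping : List Int) (nums : List Int), Dom_sortJumbled mapping nums → Pre_sortJumbled mapping nums → Spec_sortJumbled mapping nums (sortJumbled mapping nums)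

-- ===== LEMMAS AND PROOFS =====

-- Nat.toDigitsCore appends onto its accumulator.
lemma toDigitsCore_acc (b : Nat) : ∀ (f n : Nat) (acc : List Char),
    Nat.toDigitsCore b f n acc = Nat.toDigitsCore b f n [] ++ acc := by
  intro f
  induction f with
  | zero => intro n acc; simp [Nat.toDigitsCore]
  | succ f ih =>
    intro n acc
    simp only [Nat.toDigitsCore]
    by_cases h : n / b = 0
    · simp [h]
    · simp only [h, if_false]
      rw [ih (n / b) (Nat.digitChar (n % b) :: acc), ih (n / b) [Nat.digitChar (n % b)]]
      simp

-- Nat.toDigitsCore is fuel-independent once the fuel exceeds the number.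
lemma toDigitsCore_fuel : ∀ (n f f' : Nat) (acc : List Char), n < f → n < f' →
    Nat.toDigitsCore 10 f n acc = Nat.toDigitsCore 10 f' n acc := by
  intro n
  induction n using Nat.strong_induction_on with
  | _ n ih =>
    intro f f' acc hf hf'
    obtain ⟨g, rfl⟩ := Nat.exists_eq_succ_of_ne_zero (Nat.pos_iff_ne_zero.mp (Nat.lt_of_le_of_lt (Nat.zero_le n) hf))
    obtain ⟨g', rfl⟩ := Nat.exists_eq_succ_of_ne_zero (Nat.pos_iff_ne_zero.mp (Nat.lt_of_le_of_lt (Nat.zero_le n) hf'))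
    simp only [Nat.toDigitsCore]
    by_cases h : n / 10 = 0
    · simp [h]
    · simp only [h, if_false]
      have hlt : n / 10 < n := Nat.div_lt_self (Nat.pos_of_ne_zero (fun hn => h (by simp [hn]))) (by norm_num)
      exact ih (n / 10) hlt g g' _ (by omega) (by omega)

-- The recursion str(n) = str(n // 10) + str(n % 10) for n ≥ 10, and the base case.
lemma toDigits_base (n : Nat) (h : n < 10) : Nat.toDigits 10 n = [Nat.digitChar n] := by
  have h0 : n / 10 = 0 := Nat.div_eq_of_lt h
  simp [Nat.toDigits, Nat.toDigitsCore, h0, Nat.mod_eq_of_lt h]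

lemma toDigits_step (n : Nat) (h : 10 ≤ n) :
    Nat.toDigits 10 n = Nat.toDigits 10 (n / 10) ++ [Nat.digitChar (n % 10)] := by
  have h0 : n / 10 ≠ 0 := by
    intro hc; exact absurd (Nat.lt_of_div_eq_zero (by norm_num) hc) (by omega)
  have hlt : n / 10 < n := Nat.div_lt_self (by omega) (by norm_num)
  simp only [Nat.toDigits, Nat.toDigitsCore, h0, if_false]
  rw [toDigitsCore_acc 10 n (n / 10) [Nat.digitChar (n % 10)]]
  congr 1
  exact toDigitsCore_fuel (n / 10) n (n / 10 + 1) [] hlt (Nat.lt_succ_self _)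

lemma toDigits_ne_nil (n : Nat) : Nat.toDigits 10 n ≠ [] := by
  by_cases h : n < 10
  · simp [toDigits_base n h]
  · rw [toDigits_step n (by omega)]; simp

lemma toChars_ne_nil (v : Int) : PySem.Int.toChars v ≠ [] := by
  unfold PySem.Int.toChars
  split
  · simp
  · exact toDigits_ne_nil _

-- int(c) of the character of a single digit d is d.
lemma parse_digitChar (d : Nat) (h : d < 10) :
    (PySem.Int.ofChars? [Nat.digitChar d]).getD 0 = (d : Int) := by
  interval_cases d <;> decide

-- A's while-loop builds exactly the concatenation of the mapped pieces of str(n), left to right.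
lemma aLoop_eq_flatten (mapping : List Int) : ∀ (n : Nat), 0 < n → ∀ (acc : List Char),
    aLoop mapping n acc =
      ((Nat.toDigits 10 n).map (fun c =>
        PySem.Int.toChars (PySem.List.pyGetD mapping ((PySem.Int.ofChars? [c]).getD 0) 0))).flatten ++ acc := by
  intro n
  induction n using Nat.strong_induction_on with
  | _ n ih =>
    intro hn acc
    rw [aLoop]
    simp only [Nat.pos_iff_ne_zero.mp hn, if_false]
    by_cases h : n < 10
    · have h0 : n / 10 = 0 := Nat.div_eq_of_lt h
      rw [h0, aLoop]
      simp [toDigits_base n h, Nat.mod_eq_of_lt h, parse_digitChar n h]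
    · have h10 : 10 ≤ n := by omega
      have hpos : 0 < n / 10 := Nat.div_pos h10 (by norm_num)
      rw [ih (n / 10) (Nat.div_lt_self hn (by norm_num)) hpos]
      rw [toDigits_step n h10]
      simp [parse_digitChar (n % 10) (Nat.mod_lt n (by norm_num))]

-- A's per-element key equals bKey on nonnegative x (branch structure included).
lemma body_eq (mapping : List Int) (x : Int) (hx : 0 ≤ x) (ans : List (Int × Int)) :
    (if x = 0 then ans ++ [(x, PySem.List.pyGetD mapping 0 0)]
     else
       let nn := aLoop mapping x.toNat []
       if nn ≠ [] then ans ++ [(x, (PySem.Int.ofChars? nn).getD 0)] else ans)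
    = ans ++ [(x, bKey mapping x)] := by
  by_cases h0 : x = 0
  · simp [h0, bKey]
  · have hpos : 0 < x.toNat := by omega
    have hs : aLoop mapping x.toNat [] =
        ((Nat.toDigits 10 x.toNat).map (fun c =>
          PySem.Int.toChars (PySem.List.pyGetD mapping ((PySem.Int.ofChars? [c]).getD 0) 0))).flatten := by
      simpa using aLoop_eq_flatten mapping x.toNat hpos []
    have hne : aLoop mapping x.toNat [] ≠ [] := by
      rw [hs]
      obtain ⟨c, cs, hcc⟩ := List.exists_cons_of_ne_nil (toDigits_ne_nil x.toNat)
      rw [hcc]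
      simp only [List.map_cons, List.flatten_cons]
      exact fun hc => toChars_ne_nil _ (List.append_eq_nil_iff.mp hc).1
    have hchars : PySem.Int.toChars x = Nat.toDigits 10 x.toNat := by
      unfold PySem.Int.toChars
      simp [not_lt.mpr hx]
    simp only [h0, if_false, hne, ne_eq, not_false_eq_true, if_true]
    rw [hs, bKey]
    simp [h0, hchars]

-- insertion into a mapped list commutes with the map when the key factors through it.
lemma insertBy_map {α β κ : Type} [LinearOrder κ] (g : α → β) (kb : β → κ) (x : α) (ys : List α) :
    PySem.List.insertBy (fun a b => decide (kb a < kb b)) (g x) (ys.map g)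
      = (PySem.List.insertBy (fun a b => decide (kb (g a) < kb (g b))) x ys).map g := by
  induction ys with
  | nil => simp [PySem.List.insertBy]
  | cons y ys ih =>
    simp only [List.map_cons, PySem.List.insertBy]
    by_cases h : kb (g x) < kb (g y)
    · simp [h]
    · simp [h, ih]

-- sorting a mapped list by kb is the map of sorting by kb ∘ g.
lemma sorted_map {α β κ : Type} [LinearOrder κ] (g : α → β) (kb : β → κ) (l : List α) :
    PySem.List.sorted (l.map g) kb false = (PySem.List.sorted l (fun a => kb (g a)) false).map g := by
  rw [PySem.List.sorted_eq_foldl_insertBy, PySem.List.sorted_eq_foldl_insertBy, List.foldl_map]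
  suffices h : ∀ (xs : List α) (acc : List α),
      xs.foldl (fun acc x => PySem.List.insertBy (fun a b => decide (kb a < kb b)) (g x) acc)
        (acc.map g)
      = (xs.foldl (fun acc x =>
          PySem.List.insertBy (fun a b => decide (kb (g a) < kb (g b))) x acc) acc).map g by
    simpa using h l []
  intro xs
  induction xs with
  | nil => intro acc; simp
  | cons x xs ih =>
    intro acc
    simp only [List.foldl_cons]
    rw [insertBy_map g kb x acc, ih]

-- the lexicographic key used on the B side: (mapped key, original index).
def lexK (k : Int → Int) (p : Int × Int) : Int ×ₗ Int := toLex (k p.2, p.1)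

-- STABILITY of PySem.List.sorted: on a list with strictly increasing first components,
-- sorting by k ∘ snd yields a list strictly increasing under the lexicographic key.
lemma insertBy_lex (k : Int → Int) (x : Int × Int) : ∀ (acc : List (Int × Int)),
    List.Pairwise (fun a b => lexK k a < lexK k b) acc → (∀ y ∈ acc, y.1 < x.1) →
    List.Pairwise (fun a b => lexK k a < lexK k b)
      (PySem.List.insertBy (fun a b => decide (k a.2 < k b.2)) x acc) := by
  intro acc
  induction acc with
  | nil => intro _ _; simp [PySem.List.insertBy]
  | cons y ys ih =>
    intro hp hidx
    simp only [PySem.List.insertBy]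
    by_cases h : k x.2 < k y.2
    · simp only [h, decide_true, if_true]
      constructor
      · intro z hz
        rcases List.mem_cons.mp hz with rfl | hz
        · exact Prod.Lex.lt_iff.mpr (Or.inl h)
        · have hyz := (List.pairwise_cons.mp hp).1 z hz
          have : k y.2 ≤ k z.2 := by
            rcases Prod.Lex.lt_iff.mp hyz with h' | ⟨h', _⟩
            · exact le_of_lt h'
            · exact le_of_eq h'
          exact Prod.Lex.lt_iff.mpr (Or.inl (lt_of_lt_of_le h this))
      · exact hp
    · simp only [h, decide_false]
      constructor
      · intro z hz
        rcases (PySem.List.mem_insertBy _ _ _ _).mp hz with rfl | hz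
        · rcases lt_or_eq_of_le (not_lt.mp h) with h' | h'
          · exact Prod.Lex.lt_iff.mpr (Or.inl h')
          · exact Prod.Lex.lt_iff.mpr (Or.inr ⟨h', hidx y (by simp)⟩)
        · exact (List.pairwise_cons.mp hp).1 z hz
      · exact ih (List.pairwise_cons.mp hp).2 (fun y hy => hidx y (by simp [hy]))

lemma sorted_stable (k : Int → Int) (l : List (Int × Int))
    (hl : List.Pairwise (fun a b => a.1 < b.1) l) :
    List.Pairwise (fun a b => lexK k a < lexK k b)
      (PySem.List.sorted l (fun p => k p.2) false) := by
  rw [PySem.List.sorted_eq_foldl_insertBy]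
  suffices h : ∀ (xs : List (Int × Int)) (acc : List (Int × Int)),
      List.Pairwise (fun a b => a.1 < b.1) xs →
      List.Pairwise (fun a b => lexK k a < lexK k b) acc →
      (∀ y ∈ acc, ∀ x ∈ xs, y.1 < x.1) →
      List.Pairwise (fun a b => lexK k a < lexK k b)
        (xs.foldl (fun acc x => PySem.List.insertBy (fun a b => decide (k a.2 < k b.2)) x acc) acc) by
    exact h l [] hl (by simp) (by simp)
  intro xs
  induction xs with
  | nil => intro acc _ hacc _; simpa using hacc
  | cons x xs ih =>
    intro acc hxs hacc hsep
    simp only [List.foldl_cons]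
    refine ih _ (List.pairwise_cons.mp hxs).2
      (insertBy_lex k x acc hacc (fun y hy => hsep y hy x (by simp))) ?_
    intro y hy z hz
    rcases (PySem.List.mem_insertBy _ _ _ _).mp hy with rfl | hy
    · exact (List.pairwise_cons.mp hxs).1 z hz
    · exact hsep y hy z (by simp [hz])

-- enumerate facts.
lemma enumerate_le (l : List Int) : ∀ (s : Int), ∀ p ∈ PySem.List.enumerate l s, s ≤ p.1 := by
  induction l with
  | nil => intro s p hp; simp [PySem.List.enumerate] at hp
  | cons x xs ih =>
    intro s p hp
    rw [PySem.List.enumerate_cons] at hp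
    rcases List.mem_cons.mp hp with rfl | hp
    · simp
    · exact le_trans (by omega) (ih (s + 1) p hp)

lemma enumerate_pairwise (l : List Int) : ∀ (s : Int),
    List.Pairwise (fun a b => a.1 < b.1) (PySem.List.enumerate l s) := by
  induction l with
  | nil => intro s; simp [PySem.List.enumerate]
  | cons x xs ih =>
    intro s
    rw [PySem.List.enumerate_cons]
    exact List.pairwise_cons.mpr
      ⟨fun p hp => lt_of_lt_of_le (by omega) (enumerate_le xs (s + 1) p hp), ih (s + 1)⟩

lemma enumerate_map_snd (l : List Int) : ∀ (s : Int),
    (PySem.List.enumerate l s).map (fun p => p.2) = l := by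
  induction l with
  | nil => intro s; simp [PySem.List.enumerate]
  | cons x xs ih => intro s; rw [PySem.List.enumerate_cons]; simp [ih]

-- the B-side merge loop is the plain structural merge.
def mergeRec : List (Int × Int × Int) → List (Int × Int × Int) → List (Int × Int × Int)
  | [], v => v
  | u, [] => u
  | a :: u, b :: v =>
    if bLe a b then a :: mergeRec u (b :: v) else b :: mergeRec (a :: u) v
  termination_by u v => u.length + v.length
  decreasing_by all_goals simp only [List.length_cons]; omega

lemma mergeRec_nil_right (u : List (Int × Int × Int)) : mergeRec u [] = u := by
  cases u <;> simp [mergeRec]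

lemma mergeLoop_eq_mergeRec (u v : List (Int × Int × Int)) : ∀ (i j : Nat)
    (out : List (Int × Int × Int)),
    mergeLoop u v i j out = out ++ mergeRec (u.drop i) (v.drop j) := by
  intro i j out
  fun_induction mergeLoop u v i j out with
  | case1 i j out h hc ih =>
    rw [ih, List.drop_eq_getElem_cons h.1, List.drop_eq_getElem_cons h.2, mergeRec]
    simp [hc]
  | case2 i j out h hc ih =>
    rw [ih, List.drop_eq_getElem_cons h.1, List.drop_eq_getElem_cons h.2, mergeRec]
    simp [hc]
  | case3 i j out h =>
    rcases not_and_or.mp h with h' | h'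
    · rw [List.drop_eq_nil_of_le (by omega)]
      cases hv : v.drop j <;> simp [mergeRec]
    · rw [List.drop_eq_nil_of_le (le_of_not_gt h'), mergeRec_nil_right]; simp

lemma mergeRec_perm : ∀ (u v : List (Int × Int × Int)), (mergeRec u v).Perm (u ++ v) := by
  intro u v
  fun_induction mergeRec u v with
  | case1 v => simp
  | case2 u _ => simp
  | case3 a u b v hc ih => exact (ih.cons a).trans (by simp)
  | case4 a u b v hc ih =>
    exact (ih.cons b).trans List.perm_middle.symm

-- the boolean bLe decides the lexicographic ≤ on (key, index).
def lexT (t : Int × Int × Int) : Int ×ₗ Int := toLex (t.1, t.2.1)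

lemma bLe_iff (a b : Int × Int × Int) : bLe a b = true ↔ lexT a ≤ lexT b := by
  rw [bLe, decide_eq_true_iff, lexT, lexT, Prod.Lex.le_iff]
  simp

lemma mergeRec_pairwise : ∀ (u v : List (Int × Int × Int)),
    List.Pairwise (fun a b => lexT a ≤ lexT b) u →
    List.Pairwise (fun a b => lexT a ≤ lexT b) v →
    List.Pairwise (fun a b => lexT a ≤ lexT b) (mergeRec u v) := by
  intro u v
  fun_induction mergeRec u v with
  | case1 v => intro _ hv; exact hv
  | case2 u _ => intro hu _; simpa [mergeRec_nil_right] using hu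
  | case3 a u b v hc ih =>
    intro hu hv
    refine List.pairwise_cons.mpr ⟨?_, ih (List.pairwise_cons.mp hu).2 hv⟩
    intro z hz
    have hz' : z ∈ u ++ b :: v := (mergeRec_perm u (b :: v)).mem_iff.mp hz
    have hab : lexT a ≤ lexT b := (bLe_iff a b).mp hc
    rcases List.mem_append.mp hz' with hz' | hz'
    · exact (List.pairwise_cons.mp hu).1 z hz'
    · rcases hz' with _ | hz'
      · exact hab
      · exact le_trans hab ((List.pairwise_cons.mp hv).1 z (by assumption))
  | case4 a u b v hc ih =>
    intro hu hv
    refine List.pairwise_cons.mpr ⟨?_, ih hu (List.pairwise_cons.mp hv).2⟩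
    intro z hz
    have hz' : z ∈ (a :: u) ++ v := (mergeRec_perm (a :: u) v).mem_iff.mp hz
    have hba : lexT b ≤ lexT a := le_of_not_ge (fun hle => hc ((bLe_iff a b).mpr hle))
    rcases List.mem_append.mp hz' with hz' | hz'
    · rcases hz' with _ | hz'
      · exact hba
      · exact le_trans hba ((List.pairwise_cons.mp hu).1 z (by assumption))
    · exact (List.pairwise_cons.mp hv).1 z hz'

lemma msort_perm : ∀ (p : List (Int × Int × Int)), (msort p).Perm p := by
  intro p
  fun_induction msort p with
  | case1 p h => exact List.Perm.refl p
  | case2 p h ih1 ih2 =>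
    rw [mergeLoop_eq_mergeRec]
    simp only [List.drop_zero, List.nil_append]
    exact ((mergeRec_perm _ _).trans (ih1.append ih2)).trans
      (by rw [List.take_append_drop])

lemma msort_pairwise : ∀ (p : List (Int × Int × Int)),
    List.Pairwise (fun a b => lexT a ≤ lexT b) (msort p) := by
  intro p
  fun_induction msort p with
  | case1 p h =>
    match p, h with
    | [], _ => simp
    | [a], _ => simp
  | case2 p h ih1 ih2 =>
    rw [mergeLoop_eq_mergeRec]
    simpa using mergeRec_pairwise _ _ ih1 ih2

-- the triples carry pairwise-distinct indices, so the ≤-chain is in fact strict.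
lemma msort_pairwise_lt (l : List (Int × Int)) (k : Int → Int)
    (hl : List.Pairwise (fun a b => a.1 < b.1) l) :
    List.Pairwise (fun a b => lexT a < lexT b)
      (msort (l.map (fun p => (k p.2, p.1, p.2)))) := by
  have hperm := msort_perm (l.map (fun p => (k p.2, p.1, p.2)))
  have hne : List.Pairwise (fun a b => a.2.1 ≠ b.2.1)
      (msort (l.map (fun p => (k p.2, p.1, p.2)))) := by
    have h1 : List.Pairwise (fun a b : Int × Int × Int => a.2.1 ≠ b.2.1)
        (l.map (fun p => (k p.2, p.1, p.2))) := by
      rw [List.pairwise_map]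
      exact hl.imp (fun h => by simpa using ne_of_lt h)
    have h2 : List.Pairwise (fun a b : Int × Int × Int => a.2.1 ≠ b.2.1 ∧ b.2.1 ≠ a.2.1)
        (l.map (fun p => (k p.2, p.1, p.2))) := h1.and (h1.imp fun h => Ne.symm h)
    exact ((hperm.pairwise_iff (fun h => ⟨h.2, h.1⟩)).mpr h2).imp And.left
  refine (msort_pairwise _).and hne |>.imp ?_
  rintro a b ⟨hle, hne⟩
  rcases lt_or_eq_of_le hle with h | h
  · exact h
  · exfalso
    apply hne
    have := congrArg ofLex h
    simpa [lexT] using congrArg (fun q : Int × Int => q.2) this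
  
-- ===== VERDICT (by name: the statement is the Claim_ definition above) =====
theorem sortJumbled_spec : Claim_equal_sortJumbled := by
  intro mapping nums _hdom hpre
  unfold Spec_sortJumbled sortJumbled sortJumbled_alt
  set k := bKey mapping with hk
  -- A's fold decorates nums with its key, equal to bKey on Pre_.
  have hfold : nums.foldl (fun ans x =>
      if x = 0 then ans ++ [(x, PySem.List.pyGetD mapping 0 0)]
      else
        let nn := aLoop mapping x.toNat []
        if nn ≠ [] then ans ++ [(x, (PySem.Int.ofChars? nn).getD 0)] else ans) []
      = nums.map (fun x => (x, k x)) := by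
    rw [PySem.List.foldl_congr_mem nums _ (fun ans x => ans ++ [(x, k x)]) []
      (fun acc x hx => body_eq mapping x (hpre x hx).1 acc)]
    simpa using PySem.List.foldl_append_singleton_eq_map (fun x => (x, k x)) nums []
  -- both sides reduce to the stable sort of the enumerated list by k ∘ snd.
  have hE : (PySem.List.enumerate nums).map (fun p => (p.2, k p.2)) = nums.map (fun x => (x, k x)) := by
    have := enumerate_map_snd nums 0
    calc (PySem.List.enumerate nums).map (fun p => (p.2, k p.2))
        = ((PySem.List.enumerate nums).map (fun p => p.2)).map (fun x => (x, k x)) := by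
          rw [List.map_map]; rfl
      _ = nums.map (fun x => (x, k x)) := by rw [this]
  have hA : (PySem.List.sorted (nums.map (fun x => (x, k x))) (fun p => p.2) false).map (fun p => p.1)
      = (PySem.List.sorted (PySem.List.enumerate nums) (fun p => k p.2) false).map (fun p => p.2) := by
    rw [← hE, sorted_map (fun p : Int × Int => (p.2, k p.2)) (fun q : Int × Int => q.2)]
    rw [List.map_map]; rfl
  -- B: msort is the sort by the strict lexicographic key, which by stability is the same order.
  have hperm := msort_perm ((PySem.List.enumerate nums).map (fun p => (k p.2, p.1, p.2)))
  have hB : msort ((PySem.List.enumerate nums).map (fun p => (k p.2, p.1, p.2)))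
      = PySem.List.sorted ((PySem.List.enumerate nums).map (fun p => (k p.2, p.1, p.2))) lexT := by
    exact (PySem.List.sorted_eq_of_perm_of_pairwise_lt _ _ lexT hperm
      (msort_pairwise_lt _ k (enumerate_pairwise nums 0))).symm
  have hstab : PySem.List.sorted (PySem.List.enumerate nums) (fun p => lexK k p) false
      = PySem.List.sorted (PySem.List.enumerate nums) (fun p => k p.2) false := by
    exact PySem.List.sorted_eq_of_perm_of_pairwise_lt _ _ (lexK k)
      (PySem.List.sorted_perm _ _ _)
      (sorted_stable k (PySem.List.enumerate nums) (enumerate_pairwise nums 0))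
  simp only [hfold, hA, hB]
  rw [sorted_map (fun p : Int × Int => (k p.2, p.1, p.2)) lexT]
  rw [List.map_map]
  have hkey : (fun p : Int × Int => lexT (k p.2, p.1, p.2)) = (fun p => lexK k p) := rfl
  simp only [hkey, hstab]
  rfl
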